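-- pv_equiv track=rewrite | github.com/techyshiv/Python | data_structures/arrays/sliding_window.py | sum_of_k_subarray
-- ===== SOURCE A (Python) =====
-- from collections import deque
--
-- def sum_of_k_subarray(arr: list[int], window_size: int) -> int:
--     """
--     Find the sum of the max and min elements of all sub-arrays of size k.
--
--     Args:
--         arr (list[int]): The input array of integers.
--         window_size (int): Size of the sub-arrays.
--
--     Returns:
--         int: The sum of max and min elements of all sub-arrays of size k.
--
--     Examples:
--         >>> sum_of_k_subarray([2, 5, -1, 7, -3, -1, -2], 4)
--         18
--         >>> sum_of_k_subarray([1, 3, 2, 4, 5], 2)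
--         24
--         >>> sum_of_k_subarray([1, 3, -2, 8, -7, 10], 3)
--         11
--         >>> sum_of_k_subarray([-5, -1, -3, -4, -2], 3)
--         -17
--         >>> sum_of_k_subarray([10, 20, 30, 40], 1)
--         200
--     """
--     # Deques to store indices of the elements of interest
--     max_deque = deque()
--     min_deque = deque()
--     total_sum = 0
--
--     for i in range(len(arr)):
--         if max_deque and max_deque[0] < i - window_size + 1:
--             max_deque.popleft()
--         if min_deque and min_deque[0] < i - window_size + 1:
--             min_deque.popleft()
--
--         while max_deque and arr[max_deque[-1]] <= arr[i]:
--             max_deque.pop()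
--
--         while min_deque and arr[min_deque[-1]] >= arr[i]:
--             min_deque.pop()
--
--         max_deque.append(i)
--         min_deque.append(i)
--
--         if i >= window_size - 1:
--             max_element = arr[max_deque[0]]
--             min_element = arr[min_deque[0]]
--             total_sum += max_element + min_element
--
--     return total_sum
-- ===== SOURCE B (Python) =====
-- def sum_of_k_subarray(arr: list[int], window_size: int) -> int:
--     total = 0
--     for start in range(len(arr) - window_size + 1):
--         window = arr[start:start + window_size]
--         total += max(window) + min(window)
--     return total
-- ===== Notes on version B (the rewrite author's own statement) =====
-- stated objective: simpler
-- what changed: Replaces the two monotonic index deques with a direct rescan: for each window take the slice and add max(window)+min(window), dropping all deque bookkeeping.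
-- outside the precondition, e.g. on sum_of_k_subarray([2, 5, -1], 0): A returns 12, B raises ValueError
import Mathlib
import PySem

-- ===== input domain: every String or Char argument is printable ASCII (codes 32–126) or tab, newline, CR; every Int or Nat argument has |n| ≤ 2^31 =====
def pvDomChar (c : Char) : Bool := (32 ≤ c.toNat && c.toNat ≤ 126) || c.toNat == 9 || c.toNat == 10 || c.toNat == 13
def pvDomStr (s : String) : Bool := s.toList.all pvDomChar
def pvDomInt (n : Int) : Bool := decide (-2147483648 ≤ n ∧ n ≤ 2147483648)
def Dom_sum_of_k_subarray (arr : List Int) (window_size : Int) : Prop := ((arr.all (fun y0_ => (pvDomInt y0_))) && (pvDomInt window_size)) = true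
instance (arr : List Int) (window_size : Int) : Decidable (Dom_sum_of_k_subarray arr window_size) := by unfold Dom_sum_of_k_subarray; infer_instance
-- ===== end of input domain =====

-- B replaces A's two monotonic index deques by a direct per-window rescan (slice, max+min); proved equal for window_size ≥ 1.


-- ===== PORT A =====
-- Deques of indices kept as `List Nat` (front = head); pop-from-back = reverse/dropWhile/reverse.
def sum_of_k_subarray (arr : List Int) (window_size : Int) : Int :=
  ((List.range arr.length).foldl
    (fun (st : List Nat × List Nat × Int) (i : Nat) =>
      let maxD := st.1
      let minD := st.2.1
      let total := st.2.2
      -- if max_deque and max_deque[0] < i - window_size + 1: max_deque.popleft()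
      let maxD := match maxD with
        | j :: rest => if (j : Int) < (i : Int) - window_size + 1 then rest else j :: rest
        | [] => []
      let minD := match minD with
        | j :: rest => if (j : Int) < (i : Int) - window_size + 1 then rest else j :: rest
        | [] => []
      -- while max_deque and arr[max_deque[-1]] <= arr[i]: max_deque.pop();  max_deque.append(i)
      let maxD := (maxD.reverse.dropWhile (fun j => decide (arr.getD j 0 ≤ arr.getD i 0))).reverse ++ [i]
      -- while min_deque and arr[min_deque[-1]] >= arr[i]: min_deque.pop();  min_deque.append(i)
      let minD := (minD.reverse.dropWhile (fun j => decide (arr.getD i 0 ≤ arr.getD j 0))).reverse ++ [i]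
      let total := if (i : Int) ≥ window_size - 1
        then total + arr.getD (maxD.headD 0) 0 + arr.getD (minD.headD 0) 0
        else total
      (maxD, minD, total))
    ([], [], 0)).2.2

-- ===== PORT B =====
def sum_of_k_subarray_alt (arr : List Int) (window_size : Int) : Int :=
  (PySem.List.pyRange 0 ((arr.length : Int) - window_size + 1) 1).foldl
    (fun total start =>
      let window := PySem.List.slice arr (some start) (some (start + window_size))
      total + (PySem.List.max? window (fun x => x)).getD 0
            + (PySem.List.min? window (fun x => x)).getD 0)
    0

-- ===== PRECONDITION & SPEC =====
-- Pre_ excludes window_size ≤ 0, where A's leftover-deque bookkeeping happens to return 2*sum(arr)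
-- while B's max()/min() over the then-empty slice raises ValueError.
def Pre_sum_of_k_subarray (arr : List Int) (window_size : Int) : Prop := 1 ≤ window_size
instance (arr : List Int) (window_size : Int) : Decidable (Pre_sum_of_k_subarray arr window_size) := by unfold Pre_sum_of_k_subarray; infer_instance
def pvWitness_sum_of_k_subarray : List Int × Int := ([1, 3, 2, 4, 5], 2)
def Spec_sum_of_k_subarray (arr : List Int) (window_size : Int) (out : Int) : Prop := out = sum_of_k_subarray_alt arr window_size
instance (arr : List Int) (window_size : Int) (out : Int) : Decidable (Spec_sum_of_k_subarray arr window_size out) := by unfold Spec_sum_of_k_subarray; infer_instance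

-- ===== CLAIM (what is proved, stated in full; the proofs are below) =====
def Claim_equal_sum_of_k_subarray : Prop := ∀ (arr : List Int) (window_size : Int), Dom_sum_of_k_subarray arr window_size → Pre_sum_of_k_subarray arr window_size → Spec_sum_of_k_subarray arr window_size (sum_of_k_subarray arr window_size)

-- ===== LEMMAS AND PROOFS =====

-- one deque update (pop stale front, pop dominated back, append i), parametrised by the value list v
def pvPopFront (lo : Int) (d : List Nat) : List Nat :=
  match d with
  | j :: rest => if (j : Int) < lo + 1 then rest else j :: rest
  | [] => []

def pvDq (v : List Int) (ws : Int) (d : List Nat) (i : Nat) : List Nat :=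
  ((pvPopFront ((i : Int) - ws) d).reverse.dropWhile
    (fun j => decide (v.getD j 0 ≤ v.getD i 0))).reverse ++ [i]

-- deque state after processing indices 0..t-1
def pvMaxD (v : List Int) (ws : Int) : Nat → List Nat
  | 0 => []
  | t + 1 => pvDq v ws (pvMaxD v ws t) t

-- running total after processing indices 0..t-1 (min deque = max deque of the negated values)
def pvTot (arr : List Int) (ws : Int) : Nat → Int
  | 0 => 0
  | t + 1 =>
    if (t : Int) ≥ ws - 1
      then pvTot arr ws t + arr.getD ((pvMaxD arr ws (t + 1)).headD 0) 0
             + arr.getD ((pvMaxD (arr.map Neg.neg) ws (t + 1)).headD 0) 0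
      else pvTot arr ws t

-- the "candidate" closed form of the deque after step i: window indices dominating everything after them
def pvCand (v : List Int) (ws : Int) (i : Nat) : List Nat :=
  (List.range (i + 1)).filter
    (fun j => decide ((i : Int) - ws + 1 ≤ (j : Int) ∧ ∀ k ≤ i, j < k → v.getD k 0 < v.getD j 0))

lemma pvGetD_map_neg (arr : List Int) (j : Nat) : (arr.map Neg.neg).getD j 0 = -(arr.getD j 0) := by
  simp [List.getD, List.getElem?_map]; cases arr[j]? <;> simp

-- the port's min-deque update is pvDq on the negated values
lemma pvMinStep (arr : List Int) (ws : Int) (d : List Nat) (i : Nat) :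
    ((pvPopFront ((i : Int) - ws) d).reverse.dropWhile
        (fun j => decide (arr.getD i 0 ≤ arr.getD j 0))).reverse ++ [i]
    = pvDq (arr.map Neg.neg) ws d i := by
  unfold pvDq
  have : (fun j => decide (arr.getD i 0 ≤ arr.getD j 0))
      = (fun j => decide ((arr.map Neg.neg).getD j 0 ≤ (arr.map Neg.neg).getD i 0)) := by
    funext j; rw [pvGetD_map_neg, pvGetD_map_neg]
    simp
  rw [this]

-- the fold state of port A, componentwise
lemma pvFoldA (arr : List Int) (ws : Int) (t : Nat) :
    (List.range t).foldl
      (fun (st : List Nat × List Nat × Int) (i : Nat) =>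
        let maxD := st.1
        let minD := st.2.1
        let total := st.2.2
        let maxD := match maxD with
          | j :: rest => if (j : Int) < (i : Int) - ws + 1 then rest else j :: rest
          | [] => []
        let minD := match minD with
          | j :: rest => if (j : Int) < (i : Int) - ws + 1 then rest else j :: rest
          | [] => []
        let maxD := (maxD.reverse.dropWhile (fun j => decide (arr.getD j 0 ≤ arr.getD i 0))).reverse ++ [i]
        let minD := (minD.reverse.dropWhile (fun j => decide (arr.getD i 0 ≤ arr.getD j 0))).reverse ++ [i]
        let total := if (i : Int) ≥ ws - 1
          then total + arr.getD (maxD.headD 0) 0 + arr.getD (minD.headD 0) 0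
          else total
        (maxD, minD, total))
      ([], [], 0)
    = (pvMaxD arr ws t, pvMaxD (arr.map Neg.neg) ws t, pvTot arr ws t) := by
  induction t with
  | zero => rfl
  | succ t ih =>
    rw [List.range_succ, List.foldl_append, ih, List.foldl_cons, List.foldl_nil]
    show (pvDq arr ws (pvMaxD arr ws t) t,
      ((pvPopFront ((t : Int) - ws) (pvMaxD (arr.map Neg.neg) ws t)).reverse.dropWhile
        (fun j => decide (arr.getD t 0 ≤ arr.getD j 0))).reverse ++ [t],
      if (t : Int) ≥ ws - 1
        then pvTot arr ws t + arr.getD ((pvDq arr ws (pvMaxD arr ws t) t).headD 0) 0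
          + arr.getD ((((pvPopFront ((t : Int) - ws) (pvMaxD (arr.map Neg.neg) ws t)).reverse.dropWhile
              (fun j => decide (arr.getD t 0 ≤ arr.getD j 0))).reverse ++ [t]).headD 0) 0
        else pvTot arr ws t)
      = (pvMaxD arr ws (t + 1), pvMaxD (arr.map Neg.neg) ws (t + 1), pvTot arr ws (t + 1))
    rw [pvMinStep]
    rfl

-- reverse/dropWhile/reverse is a filter when p is monotone along the list
lemma pvRevDropWhileRev {α : Type} (p : α → Bool) (l : List α)
    (h : l.Pairwise (fun a b => p a = true → p b = true)) :
    (l.reverse.dropWhile p).reverse = l.filter (fun x => !p x) := by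
  induction l using List.reverseRecOn with
  | nil => simp
  | append_singleton l' x ih =>
    rw [List.pairwise_append] at h
    obtain ⟨h1, _, h3⟩ := h
    have hrev : (l' ++ [x]).reverse = x :: l'.reverse := by simp
    rw [hrev, List.dropWhile_cons]
    by_cases hp : p x = true
    · rw [if_pos hp, ih h1, List.filter_append]
      simp [hp]
    · rw [if_neg hp]
      have hfl : l'.filter (fun y => !p y) = l' := by
        apply List.filter_eq_self.mpr
        intro a ha
        simp only [Bool.not_eq_eq_eq_not, Bool.not_true]
        by_contra hc
        exact hp (h3 a ha x (by simp) (by simpa using hc))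
      rw [List.filter_append, hfl]
      simp [hp]

-- popping the stale front equals filtering by the new lower bound, on a sorted in-window deque
lemma pvPopFront_eq_filter (lo : Int) (d : List Nat)
    (hsort : d.Pairwise (· < ·)) (hlo : ∀ j ∈ d, lo ≤ (j : Int)) :
    pvPopFront lo d = d.filter (fun (j : Nat) => decide (lo + 1 ≤ (j : Int))) := by
  cases d with
  | nil => rfl
  | cons j rest =>
    have hj : lo ≤ (j : Int) := hlo j (by simp)
    have hrest : ∀ x ∈ rest, j < x := by
      intro x hx; exact (List.pairwise_cons.mp hsort).1 x hx
    show (if (j : Int) < lo + 1 then rest else j :: rest) = _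
    rw [List.filter_cons]
    by_cases hc : (j : Int) < lo + 1
    · rw [if_pos hc]
      have h2 : (decide (lo + 1 ≤ (j : Int))) = false := by simp; omega
      rw [h2]
      simp only [Bool.false_eq_true, if_false]
      symm
      apply List.filter_eq_self.mpr
      intro a ha
      have := hrest a ha
      simp only [decide_eq_true_eq]
      omega
    · rw [if_neg hc]
      have h2 : (decide (lo + 1 ≤ (j : Int))) = true := by simp; omega
      rw [h2]
      simp only [if_true]
      congr 1
      symm
      apply List.filter_eq_self.mpr
      intro a ha
      have := hrest a ha
      simp only [decide_eq_true_eq]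
      omega

lemma pvCand_sorted (v : List Int) (ws : Int) (i : Nat) : (pvCand v ws i).Pairwise (· < ·) :=
  List.Pairwise.filter _ List.pairwise_lt_range

lemma pvMem_cand (v : List Int) (ws : Int) (i : Nat) (j : Nat) :
    j ∈ pvCand v ws i ↔ j ≤ i ∧ (i : Int) - ws + 1 ≤ (j : Int) ∧ ∀ k ≤ i, j < k → v.getD k 0 < v.getD j 0 := by
  simp [pvCand, List.mem_filter, List.mem_range]

lemma pvSelf_mem_cand (v : List Int) (ws : Int) (hws : 1 ≤ ws) (i : Nat) : i ∈ pvCand v ws i := by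
  rw [pvMem_cand]
  refine ⟨le_refl _, by omega, ?_⟩
  intro k hk hik; omega

-- two strictly increasing lists with the same members are equal
lemma pvSortedExt (l1 l2 : List Nat) (h1 : l1.Pairwise (· < ·)) (h2 : l2.Pairwise (· < ·))
    (hm : ∀ x, x ∈ l1 ↔ x ∈ l2) : l1 = l2 := by
  induction l1 generalizing l2 with
  | nil => cases l2 with
    | nil => rfl
    | cons b t => exact absurd ((hm b).mpr (by simp)) (by simp)
  | cons a t ih =>
    cases l2 with
    | nil => exact absurd ((hm a).mp (by simp)) (by simp)
    | cons b t2 =>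
      obtain ⟨ha1, hp1⟩ := List.pairwise_cons.mp h1
      obtain ⟨hb1, hp2⟩ := List.pairwise_cons.mp h2
      have hab : a = b := by
        have h1' := (hm a).mp (by simp)
        have h2' := (hm b).mpr (by simp)
        simp only [List.mem_cons] at h1' h2'
        rcases h1' with h | h
        · exact h
        · rcases h2' with h' | h'
          · omega
          · have := ha1 b h'
            have := hb1 a h
            omega
      subst hab
      congr 1
      apply ih t2 hp1 hp2
      intro x
      constructor
      · intro hx
        have := (hm x).mp (by simp [hx])
        simp only [List.mem_cons] at this
        rcases this with rfl | h
        · exact absurd (ha1 x hx) (by omega)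
        · exact h
      · intro hx
        have := (hm x).mpr (by simp [hx])
        simp only [List.mem_cons] at this
        rcases this with rfl | h
        · exact absurd (hb1 x hx) (by omega)
        · exact h

-- one deque step takes the closed form at i to the closed form at i+1
lemma pvStep_cand (v : List Int) (ws : Int) (hws : 1 ≤ ws) (i : Nat) :
    pvDq v ws (pvCand v ws i) (i + 1) = pvCand v ws (i + 1) := by
  unfold pvDq
  rw [pvPopFront_eq_filter _ _ (pvCand_sorted v ws i)
    (by intro j hj; rw [pvMem_cand] at hj; push_cast; omega)]
  rw [pvRevDropWhileRev _ _ ?hmono]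
  case hmono =>
    refine List.Pairwise.imp_of_mem ?_ ((pvCand_sorted v ws i).filter _)
    intro a b ha hb hab hpa
    have ha' := (pvMem_cand v ws i a).mp (List.mem_filter.mp ha).1
    have hb' := (pvMem_cand v ws i b).mp (List.mem_filter.mp hb).1
    have hba : v.getD b 0 < v.getD a 0 := ha'.2.2 b hb'.1 hab
    simp only [decide_eq_true_eq] at hpa ⊢
    omega
  apply pvSortedExt
  · rw [List.pairwise_append]
    refine ⟨List.Pairwise.filter _ (List.Pairwise.filter _ (pvCand_sorted v ws i)), by simp, ?_⟩
    intro a ha b hb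
    have := (pvMem_cand v ws i a).mp (List.mem_filter.mp (List.mem_filter.mp ha).1).1
    simp only [List.mem_singleton] at hb
    omega
  · exact pvCand_sorted v ws (i + 1)
  · intro x
    simp only [List.mem_append, List.mem_filter, List.mem_singleton, pvMem_cand,
      decide_eq_true_eq, Bool.not_eq_true', decide_eq_false_iff_not]
    constructor
    · rintro (⟨⟨⟨hx1, hx2, hx3⟩, hx4⟩, hx5⟩ | rfl)
      · refine ⟨by omega, by push_cast at hx4 ⊢; omega, ?_⟩
        intro k hk hxk
        rcases Nat.lt_succ_iff_lt_or_eq.mp (Nat.lt_succ_of_le hk) with hki | rfl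
        · exact hx3 k (by omega) hxk
        · omega
      · exact ⟨le_refl _, by push_cast; omega, fun k hk hik => by omega⟩
    · rintro ⟨hx1, hx2, hx3⟩
      rcases Nat.lt_succ_iff_lt_or_eq.mp (Nat.lt_succ_of_le hx1) with hxi | rfl
      · left
        have hxle : x ≤ i := by omega
        refine ⟨⟨⟨hxle, by push_cast at hx2 ⊢; omega, ?_⟩, by push_cast at hx2 ⊢; omega⟩, ?_⟩
        · intro k hk hxk; exact hx3 k (by omega) hxk
        · have := hx3 (i + 1) (le_refl _) (by omega)
          omega
      · right; rfl

lemma pvMaxD_eq_cand (v : List Int) (ws : Int) (hws : 1 ≤ ws) (i : Nat) :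
    pvMaxD v ws (i + 1) = pvCand v ws i := by
  induction i with
  | zero =>
    have h0 : pvMaxD v ws 1 = [0] := rfl
    rw [h0]
    apply pvSortedExt _ _ (by simp) (pvCand_sorted v ws 0)
    intro x
    rw [pvMem_cand]
    simp only [List.mem_singleton]
    constructor
    · rintro rfl; exact ⟨le_refl _, by omega, fun k hk h => by omega⟩
    · rintro ⟨h1, _, _⟩; omega
  | succ i ih =>
    show pvDq v ws (pvMaxD v ws (i + 1)) (i + 1) = _
    rw [ih]
    exact pvStep_cand v ws hws i

-- the value at the head of the closed-form deque is Python's max() of the window slice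
lemma pvHead_max (v : List Int) (ws : Int) (hws : 1 ≤ ws) (i : Nat)
    (hin : i < v.length) (hi : ws - 1 ≤ (i : Int)) :
    (PySem.List.max? (PySem.List.slice v (some ((i : Int) - ws + 1)) (some ((i : Int) + 1))) (fun x => x)).getD 0
      = v.getD ((pvCand v ws i).headD 0) 0 := by
  rw [PySem.List.slice_toNat v (by omega) (by omega)]
  set sN := ((i : Int) - ws + 1).toNat with hsN
  have hsNi : sN ≤ i := by omega
  have hlen : ((i : Int) + 1).toNat - sN = i + 1 - sN := by omega
  simp only [hlen]
  set w := (v.drop sN).take (i + 1 - sN) with hw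
  have hwlen : w.length = i + 1 - sN := by
    rw [hw, List.length_take, List.length_drop]; omega
  have hget : ∀ (m : Nat) (hm : m < w.length), w[m] = v[sN + m]'(by omega) := by
    intro m hm
    simp only [hw, List.getElem_take, List.getElem_drop]
  have hwmem : ∀ x, x ∈ w ↔ ∃ j : Nat, sN ≤ j ∧ j ≤ i ∧ ∃ hj : j < v.length, v[j] = x := by
    intro x
    rw [List.mem_iff_getElem]
    constructor
    · rintro ⟨m, hm, rfl⟩
      exact ⟨sN + m, by omega, by omega, by omega, (hget m hm).symm⟩
    · rintro ⟨j, hj1, hj2, hj3, rfl⟩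
      refine ⟨j - sN, by omega, ?_⟩
      rw [hget (j - sN) (by omega)]
      simp only [show sN + (j - sN) = j from by omega]
  have hcne : pvCand v ws i ≠ [] := fun h => by
    have := pvSelf_mem_cand v ws hws i; rw [h] at this; simp at this
  obtain ⟨h0, rest, hcons⟩ : ∃ h0 rest, pvCand v ws i = h0 :: rest := by
    cases hc : pvCand v ws i with
    | nil => exact absurd hc hcne
    | cons a b => exact ⟨a, b, rfl⟩
  have hhead : (pvCand v ws i).headD 0 = h0 := by rw [hcons]; rfl
  have hmemh : h0 ∈ pvCand v ws i := by rw [hcons]; simp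
  have hsorted := pvCand_sorted v ws i
  rw [hcons] at hsorted
  have hminh : ∀ j ∈ pvCand v ws i, h0 ≤ j := by
    intro j hj
    rw [hcons] at hj
    rcases List.mem_cons.mp hj with rfl | hj
    · exact le_refl _
    · exact le_of_lt ((List.pairwise_cons.mp hsorted).1 j hj)
  obtain ⟨hh1, hh2, hh3⟩ := (pvMem_cand v ws i h0).mp hmemh
  have hh0len : h0 < v.length := by omega
  have hkey : ∀ (m : Nat) (j : Nat), i - j ≤ m → sN ≤ j → j ≤ i → v.getD j 0 ≤ v.getD h0 0 := by
    intro m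
    induction m with
    | zero =>
      intro j h1 h2 h3
      by_cases hj : j ∈ pvCand v ws i
      · rcases eq_or_lt_of_le (hminh j hj) with rfl | hlt
        · exact le_refl _
        · exact le_of_lt (hh3 j h3 hlt)
      · have hji : j = i := by omega
        subst hji
        exact absurd (pvSelf_mem_cand v ws hws j) hj
    | succ m ihm =>
      intro j h1 h2 h3
      by_cases hj : j ∈ pvCand v ws i
      · rcases eq_or_lt_of_le (hminh j hj) with rfl | hlt
        · exact le_refl _
        · exact le_of_lt (hh3 j h3 hlt)
      · rw [pvMem_cand] at hj
        push Not at hj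
        have hsj : (i : Int) - ws + 1 ≤ (j : Int) := by omega
        obtain ⟨k, hk1, hk2, hk3⟩ := hj h3 hsj
        have hk3' : v.getD j 0 ≤ v.getD k 0 := by omega
        exact le_trans hk3' (ihm k (by omega) (by omega) hk1)
  have hvh : v.getD h0 0 = v[h0] := List.getD_eq_getElem v 0 hh0len
  have hwne : w ≠ [] := by
    intro h
    rw [h] at hwlen
    simp at hwlen
    omega
  obtain ⟨M, hM⟩ : ∃ M, PySem.List.max? w (fun x => x) = some M := by
    cases h : PySem.List.max? w (fun x => x) with
    | none => exact absurd ((PySem.List.max?_eq_none_iff w (fun x => x)).mp h) hwne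
    | some M => exact ⟨M, rfl⟩
  have hM1 : M ∈ w := PySem.List.max?_mem hM
  have hM2 := PySem.List.max?_isMax hM
  have hvhw : v.getD h0 0 ∈ w := (hwmem _).mpr ⟨h0, by omega, hh1, hh0len, hvh.symm⟩
  have hle1 : v.getD h0 0 ≤ M := hM2 _ hvhw
  obtain ⟨j, hj1, hj2, hj3, hj4⟩ := (hwmem M).mp hM1
  have hMj : v.getD j 0 = M := by rw [List.getD_eq_getElem v 0 hj3]; exact hj4
  have hle2 : M ≤ v.getD h0 0 := hMj ▸ hkey (i - j) j (le_refl _) hj1 hj2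
  rw [hM, hhead]
  simp only [Option.getD_some]
  omega

-- Python's min() of a nonempty list is minus the max() of its negation
lemma pvMin_eq_neg_max (w : List Int) (hw : w ≠ []) :
    (PySem.List.min? w (fun x => x)).getD 0 = -((PySem.List.max? (w.map Neg.neg) (fun x => x)).getD 0) := by
  obtain ⟨m, hm⟩ : ∃ m, PySem.List.min? w (fun x => x) = some m := by
    cases h : PySem.List.min? w (fun x => x) with
    | none => exact absurd ((PySem.List.min?_eq_none_iff w (fun x => x)).mp h) hw
    | some m => exact ⟨m, rfl⟩
  obtain ⟨M, hM⟩ : ∃ M, PySem.List.max? (w.map Neg.neg) (fun x => x) = some M := by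
    cases h : PySem.List.max? (w.map Neg.neg) (fun x => x) with
    | none =>
      have := (PySem.List.max?_eq_none_iff (w.map Neg.neg) (fun x => x)).mp h
      rw [List.map_eq_nil_iff] at this
      exact absurd this hw
    | some M => exact ⟨M, rfl⟩
  have h1 : M ∈ w.map Neg.neg := PySem.List.max?_mem hM
  have h2 := PySem.List.max?_isMax hM
  have h3 : m ∈ w := PySem.List.min?_mem hm
  have h4 := PySem.List.min?_isMin hm
  obtain ⟨x, hx, rfl⟩ := List.mem_map.mp h1
  have hmx : m ≤ x := h4 x hx
  have hxm : -m ≤ -x := h2 (-m) (List.mem_map_of_mem h3)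
  have : m = x := by omega
  subst this
  rw [hm, hM]
  simp

lemma pvSlice_map_neg (v : List Int) (a b : Int) (ha : 0 ≤ a) (hb : 0 ≤ b) :
    PySem.List.slice (v.map Neg.neg) (some a) (some b) = (PySem.List.slice v (some a) (some b)).map Neg.neg := by
  rw [PySem.List.slice_toNat _ ha hb, PySem.List.slice_toNat _ ha hb, List.map_take, List.map_drop]

-- filter of a range by a lower bound is a shifted range
lemma pvFilter_range (n w1 : Nat) :
    (List.range n).filter (fun i => decide (w1 ≤ i)) = (List.range (n - w1)).map (· + w1) := by
  induction n with
  | zero => simp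
  | succ n ih =>
    rw [List.range_succ, List.filter_append, ih]
    by_cases h : w1 ≤ n
    · have hn : n + 1 - w1 = (n - w1) + 1 := by omega
      rw [hn, List.range_succ, List.map_append]
      simp only [List.filter_cons, h, decide_true, if_true, List.filter_nil, List.map_cons,
        List.map_nil]
      have : n - w1 + w1 = n := by omega
      rw [this]
    · have hn : n + 1 - w1 = n - w1 := by omega
      rw [hn]
      simp only [List.filter_cons, h, decide_false]
      simp

-- per-window contribution, read off the two closed-form deques
def pvG (arr : List Int) (ws : Int) (i : Nat) : Int :=
  arr.getD ((pvCand arr ws i).headD 0) 0 + arr.getD ((pvCand (arr.map Neg.neg) ws i).headD 0) 0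

lemma pvTot_sum (arr : List Int) (ws : Int) (hws : 1 ≤ ws) (t : Nat) :
    pvTot arr ws t = (((List.range t).filter (fun (i : Nat) => decide (ws - 1 ≤ (i : Int)))).map (pvG arr ws)).sum := by
  induction t with
  | zero => rfl
  | succ t ih =>
    rw [List.range_succ, List.filter_append]
    simp only [pvTot]
    rw [pvMaxD_eq_cand arr ws hws t, pvMaxD_eq_cand (arr.map Neg.neg) ws hws t, ih]
    by_cases h : ws - 1 ≤ (t : Int)
    · rw [if_pos h]
      simp only [List.filter_cons, List.filter_nil, h, decide_true, if_true, List.map_append,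
        List.sum_append, List.map_cons, List.map_nil, List.sum_cons, List.sum_nil, pvG]
      ring
    · rw [if_neg h]
      have hnil : (List.filter (fun (i : Nat) => decide (ws - 1 ≤ (i : Int))) [t]) = [] := by
        simp
        omega
      rw [hnil]
      simp

lemma pvAlt_sum (arr : List Int) (ws : Int) :
    sum_of_k_subarray_alt arr ws =
      ((List.range ((arr.length : Int) - ws + 1).toNat).map
        (fun (t : Nat) =>
          (PySem.List.max? (PySem.List.slice arr (some (t : Int)) (some ((t : Int) + ws))) (fun x => x)).getD 0
          + (PySem.List.min? (PySem.List.slice arr (some (t : Int)) (some ((t : Int) + ws))) (fun x => x)).getD 0)).sum := by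
  unfold sum_of_k_subarray_alt
  have hr : PySem.List.pyRange 0 ((arr.length : Int) - ws + 1) 1
      = (List.range ((arr.length : Int) - ws + 1).toNat).map (Nat.cast) := by
    by_cases h : 0 ≤ (arr.length : Int) - ws + 1
    · conv_lhs => rw [← Int.toNat_of_nonneg h]
      exact PySem.List.pyRange_zero_natCast _
    · have h1 : ((arr.length : Int) - ws + 1).toNat = 0 := by omega
      have h2 : PySem.List.pyRange 0 ((arr.length : Int) - ws + 1) 1 = [] := by
        simp [PySem.List.pyRange]; omega
      rw [h1, h2]
      simp
  rw [hr, List.foldl_map]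
  rw [show (fun (total : Int) (t : Nat) =>
      (fun (total : Int) (start : Int) =>
        let window := PySem.List.slice arr (some start) (some (start + ws))
        total + (PySem.List.max? window (fun x => x)).getD 0
              + (PySem.List.min? window (fun x => x)).getD 0) total ((t : Nat) : Int))
    = (fun (total : Int) (t : Nat) => total +
        ((PySem.List.max? (PySem.List.slice arr (some (t : Int)) (some ((t : Int) + ws))) (fun x => x)).getD 0
          + (PySem.List.min? (PySem.List.slice arr (some (t : Int)) (some ((t : Int) + ws))) (fun x => x)).getD 0))
    from by funext total t; simp [add_assoc]]
  rw [PySem.List.foldl_add]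
  simp

lemma pvPointwise (arr : List Int) (ws : Int) (hws : 1 ≤ ws) (t : Nat)
    (ht : (t : Int) ≤ (arr.length : Int) - ws) :
    (PySem.List.max? (PySem.List.slice arr (some (t : Int)) (some ((t : Int) + ws))) (fun x => x)).getD 0
      + (PySem.List.min? (PySem.List.slice arr (some (t : Int)) (some ((t : Int) + ws))) (fun x => x)).getD 0
    = pvG arr ws (t + (ws - 1).toNat) := by
  set i := t + (ws - 1).toNat with hi
  have hin : i < arr.length := by omega
  have hb1 : (i : Int) - ws + 1 = (t : Int) := by omega
  have hb2 : (i : Int) + 1 = (t : Int) + ws := by omega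
  have h1 := pvHead_max arr ws hws i hin (by omega)
  rw [hb1, hb2] at h1
  set wdw := PySem.List.slice arr (some (t : Int)) (some ((t : Int) + ws)) with hwdw
  have hwne : wdw ≠ [] := by
    rw [hwdw, PySem.List.slice_toNat arr (by omega) (by omega)]
    intro h
    have := congrArg List.length h
    simp only [List.length_take, List.length_drop, List.length_nil] at this
    omega
  have h2 := pvMin_eq_neg_max wdw hwne
  have h3 := pvHead_max (arr.map Neg.neg) ws hws i (by simpa using hin) (by omega)
  rw [hb1, hb2, pvSlice_map_neg arr (t : Int) ((t : Int) + ws) (by omega) (by omega), ← hwdw] at h3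
  rw [h1, h2, h3, pvGetD_map_neg]
  simp only [neg_neg, pvG]

-- ===== VERDICT (by name: the statement is the Claim_ definition above) =====
theorem sum_of_k_subarray_spec : Claim_equal_sum_of_k_subarray := by
  intro arr ws hdom hpre
  have hws : 1 ≤ ws := hpre
  unfold Spec_sum_of_k_subarray
  unfold sum_of_k_subarray
  rw [pvFoldA]
  show pvTot arr ws arr.length = _
  rw [pvTot_sum arr ws hws, pvAlt_sum]
  have hpred : (List.range arr.length).filter (fun (i : Nat) => decide (ws - 1 ≤ (i : Int)))
      = (List.range arr.length).filter (fun (i : Nat) => decide ((ws - 1).toNat ≤ i)) := by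
    apply List.filter_congr
    intro x hx
    simp only [decide_eq_decide]
    omega
  rw [hpred, pvFilter_range, List.map_map]
  have hcnt : ((arr.length : Int) - ws + 1).toNat = arr.length - (ws - 1).toNat := by omega
  rw [hcnt]
  congr 1
  apply List.map_congr_left
  intro t ht
  rw [List.mem_range] at ht
  exact (pvPointwise arr ws hws t (by omega)).symm
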